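-- pv_equiv track=rewrite | github.com/mdrosiadis/scrabble-bot | main.py | find_starts
-- ===== SOURCE A (Python) =====
-- def find_starts(query: str) -> list[int]:
--     starts = []
--     cur_entry = -1
--     for i, l in enumerate(query):
--         if not l.isspace():
--             cur_entry = i
--         else:
--             if cur_entry != -1:
--                 starts.append(cur_entry)
--             cur_entry = -1
--
--     if cur_entry != -1:
--         starts.append(cur_entry)
--
--     return starts
-- ===== SOURCE B (Python) =====
-- def find_starts(query: str) -> list[int]:
--     starts = []
--     i = 0
--     n = len(query)
--     while i < n:
--         if query[i].isspace():
--             i += 1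
--         else:
--             j = i
--             while j + 1 < n and not query[j + 1].isspace():
--                 j += 1
--             starts.append(j)
--             i = j + 1
--     return starts
-- ===== Notes on version B (the rewrite author's own statement) =====
-- stated objective: alternative
-- what changed: B replaces A's per-character state machine (cur_entry sentinel plus post-loop flush) with a two-level run scan: an outer loop that skips whitespace and an inner loop that extends each non-whitespace run to its last index, appended directly.
import Mathlib
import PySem

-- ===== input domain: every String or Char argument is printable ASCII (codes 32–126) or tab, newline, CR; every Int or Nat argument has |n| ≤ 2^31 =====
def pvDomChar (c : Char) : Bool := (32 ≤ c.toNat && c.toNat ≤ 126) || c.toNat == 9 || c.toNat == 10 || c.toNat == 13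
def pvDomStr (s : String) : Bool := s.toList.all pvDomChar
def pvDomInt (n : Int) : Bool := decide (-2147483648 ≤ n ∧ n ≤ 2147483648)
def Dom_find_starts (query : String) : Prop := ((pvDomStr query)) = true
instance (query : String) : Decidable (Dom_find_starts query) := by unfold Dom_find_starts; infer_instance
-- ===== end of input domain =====

-- B replaces A's per-character state machine (cur_entry sentinel + post-loop flush) with a
-- two-level run scan: skip whitespace, extend each non-whitespace run, append its last index.

-- ===== PORT A =====
-- the for-loop over enumerate(query): state (starts, cur_entry), position i
def find_starts_loop : List Char → Int → Int → List Int → List Int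
  | [], _, cur, starts => if cur ≠ -1 then starts ++ [cur] else starts
  | c :: rest, i, cur, starts =>
    if ¬ (PySem.Chars.isspace c) then
      find_starts_loop rest (i + 1) i starts
    else
      find_starts_loop rest (i + 1) (-1) (if cur ≠ -1 then starts ++ [cur] else starts)

def find_starts (query : String) : List Int :=
  find_starts_loop query.toList 0 (-1) []

-- ===== PORT B =====
-- inner while loop: number of further non-whitespace chars continuing the current run
def run_len : List Char → Nat
  | [] => 0
  | c :: rest => if PySem.Chars.isspace c then 0 else run_len rest + 1

-- outer while loop over the remaining characters, i = absolute position of the head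
def find_starts_alt_loop : List Char → Int → List Int
  | [], _ => []
  | c :: rest, i =>
    if PySem.Chars.isspace c then
      find_starts_alt_loop rest (i + 1)
    else
      let n := run_len rest
      (i + n) :: find_starts_alt_loop (rest.drop n) (i + n + 1)
termination_by l => l.length
decreasing_by all_goals simp

def find_starts_alt (query : String) : List Int :=
  find_starts_alt_loop query.toList 0

-- ===== PRECONDITION & SPEC =====
def Spec_find_starts (query : String) (out : List Int) : Prop := out = find_starts_alt query
instance (query : String) (out : List Int) : Decidable (Spec_find_starts query out) := by unfold Spec_find_starts; infer_instance

-- ===== CLAIM (what is proved, stated in full; the proofs are below) =====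
def Claim_equal_find_starts : Prop := ∀ (query : String), Dom_find_starts query → Spec_find_starts query (find_starts query)

-- ===== LEMMAS AND PROOFS =====
-- Joint invariant: with no run open (cur = -1) A's loop emits exactly B's runs; with a run
-- whose last seen index is i-1 open (only possible once 1 ≤ i), A first emits that run's
-- end i-1+run_len l, then continues like B after the run.
theorem loop_agree (l : List Char) : ∀ (i : Int) (starts : List Int), 0 ≤ i →
    find_starts_loop l i (-1) starts = starts ++ find_starts_alt_loop l i ∧
    (1 ≤ i → find_starts_loop l i (i - 1) starts =
      starts ++ (i - 1 + (run_len l : Int)) :: find_starts_alt_loop (l.drop (run_len l)) (i + run_len l)) := by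
  induction l with
  | nil =>
    intro i starts hi
    constructor
    · simp [find_starts_loop, find_starts_alt_loop]
    · intro h1
      have hne : (i - 1 : Int) ≠ -1 := by omega
      simp [find_starts_loop, find_starts_alt_loop, run_len, hne]
  | cons c rest ih =>
    intro i starts hi
    by_cases hc : PySem.Chars.isspace c
    · constructor
      · simpa [find_starts_loop, find_starts_alt_loop, hc] using (ih (i + 1) starts (by omega)).1
      · intro h1
        have hne : (i - 1 : Int) ≠ -1 := by omega
        simp [find_starts_loop, find_starts_alt_loop, run_len, hc, hne,
          (ih (i + 1) (starts ++ [i - 1]) (by omega)).1]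
    · have h2 := (ih (i + 1) starts (by omega)).2 (by omega)
      rw [show (i + 1 - 1 : Int) = i from by omega] at h2
      rw [show (i + 1 + (run_len rest : Int)) = i + run_len rest + 1 from by ring] at h2
      constructor
      · simp only [find_starts_loop, find_starts_alt_loop, hc]
        rw [if_pos (by simp), if_neg (by simp)]
        exact h2
      · intro h1
        have e1 : (i - 1 + ((run_len rest + 1 : Nat) : Int)) = i + run_len rest := by push_cast; ring
        have e2 : (i + ((run_len rest + 1 : Nat) : Int)) = i + run_len rest + 1 := by push_cast; ring
        simp only [find_starts_loop, run_len, hc]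
        rw [if_pos (by simp), if_neg (by simp), e1, e2, h2]
        simp

-- ===== VERDICT (by name: the statement is the Claim_ definition above) =====
theorem find_starts_spec : Claim_equal_find_starts := by
  intro query _
  unfold Spec_find_starts find_starts find_starts_alt
  simpa using (loop_agree query.toList 0 [] (by omega)).1
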